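-- pv_equiv track=rewrite | github.com/spenpal/UTD-College-CS-Coursework | CS_4365/hw_3/main.py | tautology
-- ===== SOURCE A (Python) =====
-- def tautology(clause):
--     """Find if a clause is a tautology (always evaulates to true)
--
--     The only case where a disjunctive clause will be a tautology is
--     if a literal and its negated literal are in the same clause
--
--     Args:
--         clause (List): disjuncted literals in the clause
--
--     Returns:
--         bool: Truth value if the clause is a tautology
--     """
--     lit_idx = {}
--
--     for idx, literal in enumerate(clause):
--         raw_lit = literal.replace('~', '') # remove negation symbol if there is one
--
--         # Check if two raw literals are actual opposite literals
--         if clause[lit_idx.get(raw_lit, idx)] != literal: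
--             return True
--         else: # Add raw literal to dict
--             lit_idx[raw_lit] = idx
--
--     return False
-- ===== SOURCE B (Python) =====
-- def tautology(clause):
--     return len(set(clause)) > len({literal.replace('~', '') for literal in clause})
-- ===== Notes on version B (the rewrite author's own statement) =====
-- stated objective: simpler
-- what changed: Replaces the index-tracking dict loop with a comparison of two set sizes: distinct literals vs distinct '~'-stripped raw forms (strictly more distinct literals iff some raw form occurs with two different full forms).
import Mathlib
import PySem

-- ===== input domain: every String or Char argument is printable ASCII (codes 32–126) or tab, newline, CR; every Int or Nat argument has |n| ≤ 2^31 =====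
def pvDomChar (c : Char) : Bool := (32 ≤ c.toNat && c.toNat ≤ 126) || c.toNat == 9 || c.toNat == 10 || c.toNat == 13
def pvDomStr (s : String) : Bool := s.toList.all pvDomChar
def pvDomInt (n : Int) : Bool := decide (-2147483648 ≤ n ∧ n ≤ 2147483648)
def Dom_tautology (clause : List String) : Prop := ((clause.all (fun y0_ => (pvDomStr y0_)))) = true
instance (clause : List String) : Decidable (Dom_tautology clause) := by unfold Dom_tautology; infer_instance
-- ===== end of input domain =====

-- B replaces A's index-tracking dict loop by a comparison of two set sizes (same result, simpler code).

-- ===== PORT A =====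
-- the for-loop over enumerate(clause) with the dict lit_idx; the `none` branch of the
-- index lookup is unreachable (every stored index is in range; Python would raise there)
def tautologyGo (clause : List String) : List (Int × String) → PySem.Dict String Int → Bool
  | [], _ => false
  | (idx, literal) :: rest, litIdx =>
    let rawLit := PySem.Str.replace literal "~" ""
    match PySem.List.pyGet? clause (litIdx.getD rawLit idx) with
    | none => true
    | some s => if s ≠ literal then true else tautologyGo clause rest (litIdx.insert rawLit idx)

def tautology (clause : List String) : Bool :=
  tautologyGo clause (PySem.List.enumerate clause) PySem.Dict.empty

-- ===== PORT B =====
def tautology_alt (clause : List String) : Bool :=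
  (PySem.Set.ofList clause).length >
    (PySem.Set.ofList (clause.map (fun literal => PySem.Str.replace literal "~" ""))).length

-- ===== PRECONDITION & SPEC =====
def Spec_tautology (clause : List String) (out : Bool) : Prop := out = tautology_alt clause
instance (clause : List String) (out : Bool) : Decidable (Spec_tautology clause out) := by unfold Spec_tautology; infer_instance

-- ===== CLAIM (what is proved, stated in full; the proofs are below) =====
def Claim_equal_tautology : Prop := ∀ (clause : List String), Dom_tautology clause → Spec_tautology clause (tautology clause)

-- ===== LEMMAS AND PROOFS =====

def pvStrip (l : String) : String := PySem.Str.replace l "~" ""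

def pvBad (l : List String) : Prop := ∃ a ∈ l, ∃ b ∈ l, pvStrip a = pvStrip b ∧ a ≠ b

lemma set_length_eq_card (l : List String) :
    (PySem.Set.ofList l).length = l.toFinset.card := by
  have hnd : (PySem.Set.ofList l).Nodup := PySem.Set.nodup_ofList l
  have hfin : (PySem.Set.ofList l).toFinset = l.toFinset := by
    ext x; simp [PySem.Set.mem_ofList]
  rw [← hfin, List.toFinset_card_of_nodup hnd]

lemma alt_iff_bad (clause : List String) :
    tautology_alt clause = true ↔ pvBad clause := by
  unfold tautology_alt
  rw [set_length_eq_card, set_length_eq_card]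
  have himg : (clause.map (fun l => PySem.Str.replace l "~" "")).toFinset
      = clause.toFinset.image pvStrip := by
    ext x; simp [pvStrip]
  rw [himg]
  constructor
  · intro h
    have hgt : (clause.toFinset.image pvStrip).card < clause.toFinset.card := by
      simpa using h
    have hninj : ¬ Set.InjOn pvStrip (clause.toFinset : Set String) := by
      intro hinj
      rw [Finset.card_image_of_injOn hinj] at hgt
      exact lt_irrefl _ hgt
    simp only [Set.InjOn, not_forall] at hninj
    obtain ⟨a, ha, b, hb, hab, hne⟩ := hninj
    exact ⟨a, by simpa using ha, b, by simpa using hb, hab, hne⟩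
  · intro ⟨a, ha, b, hb, hab, hne⟩
    have hninj : ¬ Set.InjOn pvStrip (clause.toFinset : Set String) := by
      intro hinj
      exact hne (hinj (by simpa using ha) (by simpa using hb) hab)
    have hle : (clause.toFinset.image pvStrip).card ≤ clause.toFinset.card :=
      Finset.card_image_le
    have hneq : (clause.toFinset.image pvStrip).card ≠ clause.toFinset.card := by
      intro h
      exact hninj (Finset.injOn_of_card_image_eq h)
    simpa using lt_of_le_of_ne hle hneq

lemma go_spec (clause : List String) (rest : List (Int × String)) :
    ∀ (seen : List String) (d : PySem.Dict String Int),
    (∀ p ∈ rest, ∃ k : Nat, p.1 = (k : Int) ∧ clause[k]? = some p.2) →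
    (∀ raw i, d.get? raw = some i →
        ∃ s, PySem.List.pyGet? clause i = some s ∧ pvStrip s = raw ∧ s ∈ seen) →
    (∀ s ∈ seen, d.contains (pvStrip s) = true) →
    (∀ a ∈ seen, ∀ b ∈ seen, pvStrip a = pvStrip b → a = b) →
    (tautologyGo clause rest d = true ↔ pvBad (seen ++ rest.map Prod.snd)) := by
  induction rest with
  | nil =>
    intro seen d _ _ _ huni
    simp only [tautologyGo, List.map_nil, List.append_nil]
    constructor
    · intro h; cases h
    · rintro ⟨a, ha, b, hb, hab, hne⟩
      exact absurd (huni a ha b hb hab) hne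
  | cons p rest ih =>
    obtain ⟨idx, literal⟩ := p
    intro seen d hrest hd hcov huni
    obtain ⟨k, hk, hgetk⟩ := hrest (idx, literal) (by simp)
    simp only at hk hgetk
    have hlitmem : literal ∈ clause := List.mem_of_getElem? hgetk
    have hstep : ∀ (hstrip : ∀ a ∈ seen, pvStrip a = pvStrip literal → a = literal),
        (tautologyGo clause rest ((d.insert (pvStrip literal) idx)) = true ↔
          pvBad (seen ++ literal :: rest.map Prod.snd)) := by
      intro hstrip
      have := ih (seen ++ [literal]) (d.insert (pvStrip literal) idx)
        (fun q hq => hrest q (by simp [hq]))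
        (by
          intro raw i hget
          by_cases hr : raw = pvStrip literal
          · subst hr
            rw [PySem.Dict.get?_insert_self] at hget
            cases hget
            refine ⟨literal, ?_, rfl, by simp⟩
            rw [hk, PySem.List.pyGet?_natCast, hgetk]
          · rw [PySem.Dict.get?_insert_of_ne d _ (by exact hr)] at hget
            obtain ⟨s, h1, h2, h3⟩ := hd raw i hget
            exact ⟨s, h1, h2, by simp [h3]⟩)
        (by
          intro s hs
          rcases List.mem_append.mp hs with hs | hs
          · rw [PySem.Dict.contains_insert]
            simp [hcov s hs]
          · simp only [List.mem_singleton] at hs; subst hs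
            exact PySem.Dict.contains_insert_self _ _ _)
        (by
          intro a ha b hb hab
          rcases List.mem_append.mp ha with ha | ha <;>
            rcases List.mem_append.mp hb with hb | hb
          · exact huni a ha b hb hab
          · simp only [List.mem_singleton] at hb
            rw [hb] at hab ⊢
            exact hstrip a ha hab
          · simp only [List.mem_singleton] at ha
            rw [ha] at hab ⊢
            exact (hstrip b hb hab.symm).symm
          · simp only [List.mem_singleton] at ha hb
            rw [ha, hb])
      rw [this, List.append_assoc]
      simp only [List.singleton_append]
    -- now evaluate one step of the loop
    simp only [tautologyGo]
    rcases hget : d.get? (PySem.Str.replace literal "~" "") with _ | i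
    · -- raw literal not yet in the dict: clause[idx] is literal itself
      have hcontains : d.contains (PySem.Str.replace literal "~" "") = false := by
        rw [PySem.Dict.contains_eq_isSome_get?, hget]; rfl
      have hgetD : d.getD (PySem.Str.replace literal "~" "") idx = idx :=
        PySem.Dict.getD_of_get?_eq_none _ _ hget
      rw [hgetD, hk, PySem.List.pyGet?_natCast, hgetk]
      simp only [ne_eq, not_true_eq_false, if_false]
      have hstrip : ∀ a ∈ seen, pvStrip a = pvStrip literal → a = literal := by
        intro a ha hab
        exfalso
        have := hcov a ha
        rw [hab] at this
        simp only [pvStrip] at this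
        rw [this] at hcontains
        cases hcontains
      have := hstep hstrip
      rw [hk] at this
      rw [show (PySem.Str.replace literal "~" "") = pvStrip literal from rfl, this]
      simp [pvBad]
    · -- raw literal already in the dict at index i, pointing at some earlier s
      obtain ⟨s, hgs, hstrips, hsmem⟩ := hd _ i hget
      have hgetD : d.getD (PySem.Str.replace literal "~" "") idx = i :=
        PySem.Dict.getD_of_get?_eq_some _ _ hget
      rw [hgetD, hgs]
      by_cases hsl : s = literal
      · subst hsl
        simp only [ne_eq, not_true_eq_false, if_false]
        have hstrip : ∀ a ∈ seen, pvStrip a = pvStrip s → a = s := by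
          intro a ha hab
          exact huni a ha s hsmem hab
        have := hstep (by simpa [hstrips] using hstrip)
        rw [show (PySem.Str.replace s "~" "") = pvStrip s from rfl, this]
        simp [pvBad]
      · simp only [ne_eq, hsl, not_false_eq_true, if_true, true_iff]
        exact ⟨s, by simp [hsmem], literal, by simp, by simpa [pvStrip] using hstrips, hsl⟩

lemma a_iff_bad (clause : List String) : tautology clause = true ↔ pvBad clause := by
  unfold tautology
  rw [go_spec clause (PySem.List.enumerate clause) [] PySem.Dict.empty
    (by
      intro p hp
      rw [PySem.List.mem_enumerate_iff] at hp
      obtain ⟨k, hk, rfl⟩ := hp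
      exact ⟨k, by simp, by simp [hk]⟩)
    (by intro raw i h; rw [PySem.Dict.get?_empty] at h; cases h)
    (by intro s hs; cases hs)
    (by intro a ha; cases ha)]
  rw [PySem.List.map_snd_enumerate]
  simp

-- ===== VERDICT (by name: the statement is the Claim_ definition above) =====
theorem tautology_spec : Claim_equal_tautology := by
  intro clause _
  unfold Spec_tautology
  rcases hb : tautology_alt clause with _ | _
  · rcases ha : tautology clause with _ | _
    · rfl
    · exact absurd ((alt_iff_bad clause).mpr ((a_iff_bad clause).mp ha)) (by simp [hb])
  · exact (a_iff_bad clause).mpr ((alt_iff_bad clause).mp hb)
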